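-- pv_equiv track=rewrite | github.com/agniinvestor/LagnaMaster | tools/scrape_200_aa.py | _trust_for_country
-- ===== SOURCE A (Python) =====
-- def _trust_for_country(country: str, year: int) -> str:
--     c = (country or "").lower()
--     if (
--         any(
--             x in c
--             for x in [
--                 "germany",
--                 "german",
--                 "france",
--                 "french",
--                 "switzerland",
--                 "swiss",
--                 "netherlands",
--                 "dutch",
--                 "austria",
--                 "belgium",
--                 "denmark",
--                 "sweden",
--                 "norway",
--                 "finland",
--             ]
--         )
--         and year >= 1876
--     ):
--         return "high"
--     if (
--         any(
--             x in c
--             for x in ["usa", "united states", "uk", "england", "australia", "canada"]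
--         )
--         and year >= 1900
--     ):
--         return "medium"
--     if (
--         any(x in c for x in ["india", "pakistan", "bangladesh", "sri lanka", "nepal"])
--         and year < 1970
--     ):
--         return "low"
--     return "medium" if year >= 1900 else "low"
-- ===== SOURCE B (Python) =====
-- _GROUPS = [
--     [
--         "germany", "german", "france", "french", "switzerland", "swiss",
--         "netherlands", "dutch", "austria", "belgium", "denmark", "sweden",
--         "norway", "finland",
--     ],
--     ["usa", "united states", "uk", "england", "australia", "canada"],
--     ["india", "pakistan", "bangladesh", "sri lanka", "nepal"],
-- ]
--
-- # keyword -> tier index (0 = high, 1 = medium, 2 = low)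
-- _TIER = {kw: t for t, kws in enumerate(_GROUPS) for kw in kws}
-- _LABELS = ("high", "medium", "low")
--
--
-- def _ok(t, year):
--     return year < 1970 if t == 2 else year >= (1876, 1900)[t]
--
--
-- def _trust_for_country(country: str, year: int) -> str:
--     c = (country or "").lower()
--     # collect every applicable tier, then aggregate by best (minimum) priority
--     hits = [t for kw, t in _TIER.items() if kw in c and _ok(t, year)]
--     if hits:
--         return _LABELS[min(hits)]
--     return "medium" if year >= 1900 else "low"
-- ===== Notes on version B (the rewrite author's own statement) =====
-- stated objective: alternative
-- what changed: Instead of A's ordered early-return if-chain, B makes one comprehension pass over a keyword->tier dict collecting every applicable tier (keyword found and that tier's year gate holds) and aggregates them by minimum tier index, falling back to the year-only default when nothing matched.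
import Mathlib
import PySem

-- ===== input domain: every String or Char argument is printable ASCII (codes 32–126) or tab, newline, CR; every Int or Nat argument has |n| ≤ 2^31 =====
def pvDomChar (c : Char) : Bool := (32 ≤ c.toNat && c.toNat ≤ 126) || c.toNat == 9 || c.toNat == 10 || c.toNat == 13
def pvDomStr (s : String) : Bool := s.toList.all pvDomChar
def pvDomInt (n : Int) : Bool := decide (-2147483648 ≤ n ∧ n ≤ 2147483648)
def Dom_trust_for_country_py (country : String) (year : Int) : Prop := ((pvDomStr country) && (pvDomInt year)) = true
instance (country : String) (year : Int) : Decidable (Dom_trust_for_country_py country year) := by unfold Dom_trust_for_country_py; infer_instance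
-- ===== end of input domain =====

-- B replaces A's ordered early-return if-chain by one pass that collects EVERY applicable tier
-- and aggregates by minimum priority (alternative decomposition; same cost).
-- Note: Python's `(country or "")` is `country` itself for every string, so both ports lower `country` directly.

-- ===== PORT A =====
def trust_for_country_py (country : String) (year : Int) : String :=
  let c := PySem.Str.lower country
  if (["germany", "german", "france", "french", "switzerland", "swiss",
       "netherlands", "dutch", "austria", "belgium", "denmark", "sweden",
       "norway", "finland"].any fun x => PySem.Str.isIn x c) && decide (year ≥ 1876) then
    "high"
  else if (["usa", "united states", "uk", "england", "australia", "canada"].any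
        fun x => PySem.Str.isIn x c) && decide (year ≥ 1900) then
    "medium"
  else if (["india", "pakistan", "bangladesh", "sri lanka", "nepal"].any
        fun x => PySem.Str.isIn x c) && decide (year < 1970) then
    "low"
  else if year ≥ 1900 then "medium" else "low"

-- ===== PORT B =====
def pvGroupsB : List (List String) :=
  [["germany", "german", "france", "french", "switzerland", "swiss",
    "netherlands", "dutch", "austria", "belgium", "denmark", "sweden",
    "norway", "finland"],
   ["usa", "united states", "uk", "england", "australia", "canada"],
   ["india", "pakistan", "bangladesh", "sri lanka", "nepal"]]

-- `_TIER = {kw: t for t, kws in enumerate(_GROUPS) for kw in kws}`: keys are all distinct,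
-- so the dict is exactly this association list in insertion order.
def pvTier : List (String × Int) :=
  (PySem.List.enumerate pvGroupsB).flatMap fun g => g.2.map fun kw => (kw, g.1)

-- `_ok(t, year)`: `year < 1970 if t == 2 else year >= (1876, 1900)[t]`
def pvOk (t : Int) (year : Int) : Bool :=
  if t == 2 then decide (year < 1970)
  else decide (year ≥ (if t == 0 then (1876 : Int) else 1900))

def trust_for_country_py_alt (country : String) (year : Int) : String :=
  let c := PySem.Str.lower country
  let hits := (pvTier.filter fun p => PySem.Str.isIn p.1 c && pvOk p.2 year).map Prod.snd
  match PySem.List.min? hits (fun t => t) with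
  | some m => ["high", "medium", "low"].getD m.toNat ""
      -- `_LABELS[min(hits)]`: min(hits) ∈ {0, 1, 2}, always a valid index, so plain indexing
  | none => if year ≥ 1900 then "medium" else "low"

-- ===== PRECONDITION & SPEC =====
def Spec_trust_for_country_py (country : String) (year : Int) (out : String) : Prop := out = trust_for_country_py_alt country year
instance (country : String) (year : Int) (out : String) : Decidable (Spec_trust_for_country_py country year out) := by unfold Spec_trust_for_country_py; infer_instance

-- ===== CLAIM (what is proved, stated in full; the proofs are below) =====
def Claim_equal_trust_for_country_py : Prop := ∀ (country : String) (year : Int), Dom_trust_for_country_py country year → Spec_trust_for_country_py country year (trust_for_country_py country year)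

-- ===== LEMMAS AND PROOFS =====

-- the flat keyword→tier list is the three tier segments appended
theorem pvTier_eq :
    pvTier =
      (["germany", "german", "france", "french", "switzerland", "swiss",
        "netherlands", "dutch", "austria", "belgium", "denmark", "sweden",
        "norway", "finland"].map fun kw => (kw, (0 : Int))) ++
      ((["usa", "united states", "uk", "england", "australia", "canada"].map
          fun kw => (kw, (1 : Int))) ++
       (["india", "pakistan", "bangladesh", "sri lanka", "nepal"].map
          fun kw => (kw, (2 : Int)))) := by
  decide

-- one tier segment of the comprehension: the year gate is constant inside it
theorem pv_seg_eq (c : String) (year : Int) (kws : List String) (t : Int) :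
    ((kws.map fun kw => (kw, t)).filter fun p => PySem.Str.isIn p.1 c && pvOk p.2 year).map
        Prod.snd =
      (kws.filter fun k => PySem.Str.isIn k c && pvOk t year).map (fun _ => t) := by
  induction kws with
  | nil => rfl
  | cons k ks ih =>
      cases hk : (PySem.Str.isIn k c && pvOk t year) <;>
        simp only [List.map_cons, List.filter_cons, hk, Bool.false_eq_true, if_false,
          if_true, List.map_cons, ih]

theorem pv_foldl_min_const {a : Int} {l : List Int} (h : ∀ x ∈ l, a ≤ x) :
    l.foldl min a = a := by
  induction l with
  | nil => rfl
  | cons x xs ih =>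
      have hm : min a x = a := min_eq_left (h x (by simp))
      simp only [List.foldl_cons, hm]
      exact ih fun y hy => h y (by simp [hy])

-- minimum of three constant-valued segments, 0 < 1 < 2
theorem pv_min_three {α β γ : Type} (l0 : List α) (l1 : List β) (l2 : List γ) :
    PySem.List.min?
        (l0.map (fun _ => (0 : Int)) ++ (l1.map (fun _ => (1 : Int)) ++ l2.map (fun _ => (2 : Int))))
        (fun t => t) =
      if l0 ≠ [] then some 0 else if l1 ≠ [] then some 1
      else if l2 ≠ [] then some 2 else none := by
  cases l0 with
  | cons a t =>
      simp only [List.map_cons, List.cons_append, PySem.List.min?_id_cons, ne_eq,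
        reduceCtorEq, not_false_eq_true, if_true]
      congr 1
      apply pv_foldl_min_const
      intro x hx
      simp only [List.mem_append, List.mem_map] at hx
      rcases hx with ⟨_, _, rfl⟩ | ⟨_, _, rfl⟩ | ⟨_, _, rfl⟩ <;> omega
  | nil =>
    cases l1 with
    | cons a t =>
        simp only [List.map_nil, List.nil_append, List.map_cons, List.cons_append,
          PySem.List.min?_id_cons, ne_eq, not_true_eq_false, if_false,
          reduceCtorEq, not_false_eq_true, if_true]
        congr 1
        apply pv_foldl_min_const
        intro x hx
        simp only [List.mem_append, List.mem_map] at hx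
        rcases hx with ⟨_, _, rfl⟩ | ⟨_, _, rfl⟩ <;> omega
    | nil =>
      cases l2 with
      | cons a t =>
          simp only [List.map_nil, List.nil_append, List.map_cons,
            PySem.List.min?_id_cons, ne_eq, not_true_eq_false, if_false,
            reduceCtorEq, not_false_eq_true, if_true]
          congr 1
          apply pv_foldl_min_const
          intro x hx
          simp only [List.mem_map] at hx
          rcases hx with ⟨_, _, rfl⟩
          omega
      | nil => rfl

-- a segment contributes iff some keyword of its group matches and its year gate holds
theorem pv_filter_ne_nil (c : String) (year : Int) (kws : List String) (t : Int) :
    ((kws.filter fun k => PySem.Str.isIn k c && pvOk t year) ≠ []) ↔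
      (((kws.any fun x => PySem.Str.isIn x c) && pvOk t year) = true) := by
  by_cases hy : pvOk t year = true
  · simp only [hy, Bool.and_true, ne_eq, List.filter_eq_nil_iff, List.any_eq_true]
    push Not
    constructor
    · rintro ⟨x, hx, h⟩; exact ⟨x, hx, by simpa using h⟩
    · rintro ⟨x, hx, h⟩; exact ⟨x, hx, by simpa using h⟩
  · simp only [Bool.not_eq_true] at hy
    simp [hy]

-- ===== VERDICT (by name: the statement is the Claim_ definition above) =====
set_option maxHeartbeats 1000000 in
theorem trust_for_country_py_spec : Claim_equal_trust_for_country_py := by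
  intro country year _
  show _ = _
  unfold trust_for_country_py trust_for_country_py_alt
  simp only [pvTier_eq, List.filter_append, List.map_append, pv_seg_eq, pv_min_three]
  have h0 : pvOk 0 year = decide (year ≥ 1876) := rfl
  have h1 : pvOk 1 year = decide (year ≥ 1900) := rfl
  have h2 : pvOk 2 year = decide (year < 1970) := rfl
  simp only [pv_filter_ne_nil]
  simp only [h0, h1, h2]
  split_ifs <;> rfl
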